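-- pv_equiv track=rewrite | github.com/MeridianAlgo/Cryptvault | cryptvault/patterns/divergence.py | _find_closest_trough
-- ===== SOURCE A (Python) =====
-- from typing import List, Dict, Optional, Tuple
--
-- def _find_closest_trough(troughs: List[int], target_index: int, tolerance: int) -> Optional[int]:
--     """Find the closest trough to target index within tolerance."""
--     closest_trough = None
--     min_distance = float('inf')
--
--     for trough_idx in troughs:
--         distance = abs(trough_idx - target_index)
--         if distance <= tolerance and distance < min_distance:
--             min_distance = distance
--             closest_trough = trough_idx
--
--     return closest_trough
-- ===== SOURCE B (Python) =====
-- from typing import List, Optional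
--
-- def _find_closest_trough(troughs: List[int], target_index: int, tolerance: int) -> Optional[int]:
--     """Find the closest trough to target index within tolerance."""
--     ranked = sorted(troughs, key=lambda t: abs(t - target_index))
--     if not ranked:
--         return None
--     best = ranked[0]
--     if abs(best - target_index) <= tolerance:
--         return best
--     return None
-- ===== Notes on version B (the rewrite author's own statement) =====
-- stated objective: alternative
-- what changed: Replaced A's single-pass accumulator scan by a sort-then-check: stably sort all troughs by distance to target, take the head (the stable sort keeps A's first-encountered tie-break), and return it only if it lies within tolerance; the tolerance filter disappears because any out-of-tolerance global minimum implies no trough is within tolerance.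
import Mathlib
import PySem

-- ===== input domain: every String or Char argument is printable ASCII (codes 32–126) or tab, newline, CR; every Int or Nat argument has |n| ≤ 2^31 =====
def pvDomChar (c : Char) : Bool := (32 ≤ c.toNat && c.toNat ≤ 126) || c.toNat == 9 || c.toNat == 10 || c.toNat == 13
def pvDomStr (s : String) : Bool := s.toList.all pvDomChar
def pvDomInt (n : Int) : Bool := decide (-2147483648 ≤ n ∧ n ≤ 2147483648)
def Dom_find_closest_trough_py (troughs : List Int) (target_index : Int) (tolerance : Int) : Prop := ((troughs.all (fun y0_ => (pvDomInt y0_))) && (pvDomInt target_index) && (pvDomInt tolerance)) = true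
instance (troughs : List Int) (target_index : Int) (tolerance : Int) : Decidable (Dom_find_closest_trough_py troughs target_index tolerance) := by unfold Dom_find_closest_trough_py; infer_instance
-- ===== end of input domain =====

-- B replaces A's single-pass accumulator scan by sort-then-check: stably sort by
-- distance to target, take the head, return it only if it is within tolerance.

-- ===== PORT A =====
-- A's loop state: (closest_trough, min_distance); min_distance = none models float('inf').
def find_closest_trough_py (troughs : List Int) (target_index : Int) (tolerance : Int) : Option Int :=
  (troughs.foldl
    (fun (st : Option Int × Option Int) trough_idx =>
      let distance := |trough_idx - target_index|
      if distance ≤ tolerance ∧ st.2.all (fun m => distance < m) = true then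
        (some trough_idx, some distance)
      else st)
    (none, none)).1

-- ===== PORT B =====
def find_closest_trough_py_alt (troughs : List Int) (target_index : Int) (tolerance : Int) : Option Int :=
  let ranked := PySem.List.sorted troughs (fun t => |t - target_index|) false
  match ranked with
  | [] => none
  | best :: _ => if |best - target_index| ≤ tolerance then some best else none

-- ===== PRECONDITION & SPEC =====
def Spec_find_closest_trough_py (troughs : List Int) (target_index : Int) (tolerance : Int) (out : Option Int) : Prop := out = find_closest_trough_py_alt troughs target_index tolerance
instance (troughs : List Int) (target_index : Int) (tolerance : Int) (out : Option Int) : Decidable (Spec_find_closest_trough_py troughs target_index tolerance out) := by unfold Spec_find_closest_trough_py; infer_instance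

-- ===== CLAIM (what is proved, stated in full; the proofs are below) =====
def Claim_equal_find_closest_trough_py : Prop := ∀ (troughs : List Int) (target_index : Int) (tolerance : Int), Dom_find_closest_trough_py troughs target_index tolerance → Spec_find_closest_trough_py troughs target_index tolerance (find_closest_trough_py troughs target_index tolerance)

-- ===== LEMMAS AND PROOFS =====

-- First-minimal-element fold step under the distance key.
def pvMinStep (target_index : Int) (acc : Option Int) (x : Int) : Option Int :=
  match acc with
  | none => some x
  | some m => if |x - target_index| < |m - target_index| then some x else some m

-- Return the candidate only if it is within tolerance.
def pvCheck (target_index tolerance : Int) (c : Option Int) : Option Int :=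
  match c with
  | none => none
  | some m => if |m - target_index| ≤ tolerance then some m else none

-- A's fold from a coherent state computes the first-minimal fold over the filtered tail.
theorem pv_loop_eq (target_index tolerance : Int) :
    ∀ (xs : List Int) (c : Option Int),
      (xs.foldl
        (fun (st : Option Int × Option Int) trough_idx =>
          let distance := |trough_idx - target_index|
          if distance ≤ tolerance ∧ st.2.all (fun m => distance < m) = true then
            (some trough_idx, some distance)
          else st)
        (c, c.map (fun m => |m - target_index|))).1
      = (xs.filter (fun t => |t - target_index| ≤ tolerance)).foldl (pvMinStep target_index) c := by
  intro xs
  induction xs with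
  | nil => intro c; simp
  | cons x t ih =>
    intro c
    by_cases hp : |x - target_index| ≤ tolerance
    · cases c with
      | none =>
        simpa [List.foldl, List.filter, hp, pvMinStep] using ih (some x)
      | some m =>
        by_cases hlt : |x - target_index| < |m - target_index|
        · simpa [List.foldl, List.filter, hp, hlt, pvMinStep] using ih (some x)
        · simpa [List.foldl, List.filter, hp, hlt, pvMinStep] using ih (some m)
    · cases c with
      | none => simpa [List.foldl, List.filter, hp] using ih none
      | some m => simpa [List.foldl, List.filter, hp] using ih (some m)

-- The first-minimal fold over the in-tolerance elements is the tolerance check of the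
-- first-minimal fold over all elements (an out-of-tolerance running minimum means no
-- in-tolerance element has been seen yet).
theorem pv_filter_fold_eq_check (target_index tolerance : Int) :
    ∀ (xs : List Int) (c : Option Int),
      (xs.filter (fun t => |t - target_index| ≤ tolerance)).foldl (pvMinStep target_index)
          (pvCheck target_index tolerance c)
      = pvCheck target_index tolerance (xs.foldl (pvMinStep target_index) c) := by
  intro xs
  induction xs with
  | nil => intro c; simp
  | cons x t ih =>
    intro c
    by_cases hp : |x - target_index| ≤ tolerance
    · have key : pvMinStep target_index (pvCheck target_index tolerance c) x
          = pvCheck target_index tolerance (pvMinStep target_index c x) := by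
        cases c with
        | none => simp [pvMinStep, pvCheck, hp]
        | some m =>
          by_cases hm : |m - target_index| ≤ tolerance
          · by_cases hlt : |x - target_index| < |m - target_index|
            · simp [pvMinStep, pvCheck, hp, hm, hlt]
            · simp [pvMinStep, pvCheck, hm, hlt]
          · have hlt : |x - target_index| < |m - target_index| := by omega
            simp [pvMinStep, pvCheck, hm, hlt]
            exact hp
      calc ((x :: t).filter (fun t => |t - target_index| ≤ tolerance)).foldl
              (pvMinStep target_index) (pvCheck target_index tolerance c)
          = (t.filter (fun t => |t - target_index| ≤ tolerance)).foldl
              (pvMinStep target_index) (pvCheck target_index tolerance (pvMinStep target_index c x)) := by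
            simp [List.filter, hp, key]
        _ = pvCheck target_index tolerance ((x :: t).foldl (pvMinStep target_index) c) := by
            simpa [List.foldl] using ih (pvMinStep target_index c x)
    · have key : pvCheck target_index tolerance c
          = pvCheck target_index tolerance (pvMinStep target_index c x) := by
        cases c with
        | none => simp [pvMinStep, pvCheck, hp]
        | some m =>
          by_cases hlt : |x - target_index| < |m - target_index|
          · have hm : ¬ |m - target_index| ≤ tolerance := by omega
            simp [pvMinStep, pvCheck, hm, hlt]
            omega
          · simp [pvMinStep, pvCheck, hlt]
      calc ((x :: t).filter (fun t => |t - target_index| ≤ tolerance)).foldl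
              (pvMinStep target_index) (pvCheck target_index tolerance c)
          = (t.filter (fun t => |t - target_index| ≤ tolerance)).foldl
              (pvMinStep target_index) (pvCheck target_index tolerance (pvMinStep target_index c x)) := by
            simp [List.filter, hp, ← key]
        _ = pvCheck target_index tolerance ((x :: t).foldl (pvMinStep target_index) c) := by
            simpa [List.foldl] using ih (pvMinStep target_index c x)

-- Head of a stable insertion: the earlier head wins ties.
theorem pv_head_insertBy (target_index x : Int) (ys : List Int) :
    (PySem.List.insertBy (fun a b => decide (|a - target_index| < |b - target_index|)) x ys).head?
      = some ((pvMinStep target_index ys.head? x).getD x) := by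
  cases ys with
  | nil => simp [PySem.List.insertBy, pvMinStep]
  | cons y t =>
    by_cases h : |x - target_index| < |y - target_index|
    · simp [PySem.List.insertBy, pvMinStep, h]
    · simp [PySem.List.insertBy, pvMinStep, h]

-- Head of the stable insertion-sort fold = first-minimal fold over what is inserted.
theorem pv_head_foldl_insertBy (target_index : Int) :
    ∀ (xs : List Int) (acc : List Int),
      (xs.foldl (fun a x =>
          PySem.List.insertBy (fun a b => decide (|a - target_index| < |b - target_index|)) x a) acc).head?
      = xs.foldl (pvMinStep target_index) acc.head? := by
  intro xs
  induction xs with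
  | nil => intro acc; rfl
  | cons x t ih =>
    intro acc
    have h := ih (PySem.List.insertBy (fun a b => decide (|a - target_index| < |b - target_index|)) x acc)
    rw [List.foldl_cons, h, pv_head_insertBy, List.foldl_cons]
    cases hacc : acc.head? with
    | none => simp [pvMinStep]
    | some m =>
      by_cases hlt : |x - target_index| < |m - target_index|
      · simp [pvMinStep, hlt]
      · simp [pvMinStep, hlt]

-- Head of the stable sort by distance = first element of minimal distance.
theorem pv_head_sorted (target_index : Int) (xs : List Int) :
    (PySem.List.sorted xs (fun t => |t - target_index|) false).head?
      = xs.foldl (pvMinStep target_index) none := by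
  have h := pv_head_foldl_insertBy target_index xs []
  simpa [PySem.List.sorted] using h

-- ===== VERDICT (by name: the statement is the Claim_ definition above) =====
theorem find_closest_trough_py_spec : Claim_equal_find_closest_trough_py := by
  intro troughs target_index tolerance _
  unfold Spec_find_closest_trough_py find_closest_trough_py find_closest_trough_py_alt
  have hA := pv_loop_eq target_index tolerance troughs none
  simp only [Option.map_none] at hA
  rw [hA]
  have hG := pv_filter_fold_eq_check target_index tolerance troughs none
  have hnone : pvCheck target_index tolerance none = none := rfl
  rw [hnone] at hG
  rw [hG]
  have hH := pv_head_sorted target_index troughs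
  cases hr : PySem.List.sorted troughs (fun t => |t - target_index|) false with
  | nil =>
    rw [hr] at hH
    simp at hH
    simp [← hH, pvCheck]
  | cons best rest =>
    rw [hr] at hH
    simp at hH
    simp [← hH, pvCheck]
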